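-- pv_equiv track=rewrite | github.com/oliben67/my_libs | my_libs/lists/inserts.py | insert_before
-- ===== SOURCE A (Python) =====
-- from itertools import groupby
-- from typing import Any
--
-- def flatten(lst: list, recurse: bool = False):
--     """
--     Flattens a nested list into a single list.
--
--     :param lst: The nested list to be flattened.
--     :type lst: ``lst``
--     :rtype: ``lst``
--     """
--     result = [elem for sub_list in lst for elem in sub_list]
--     if not recurse or not any(isinstance(e, list) for e in result):
--         return result
--     return flatten(result, recurse=True)
--
-- def insert_before(lst: list | str, sub: list | str, elem: Any, _all: bool = False):
--     """
--     Inserts a sublist `sub` before the first occurrence of `elem` in the given list `lst`.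
--     If `_all` is True, inserts `sub` before all occurrences of `elem` in `lst`.
--
--     :param lst: The list|string to insert into.
--     :type lst: ``list|str``
--     :param sub: The list|string to insert.
--     :type sub: ``list|str``
--     :param elem: The element to search for in 'lst'.
--     :type elem: ``Any``
--     :param _all: If True, insert before all occurrences of 'elem'. Defaults to False.
--     :type _all: ``bool``
--     :rtype: ``lst``
--     """
--     if isinstance(lst, str):
--         return "".join(
--             insert_before(
--                 [*lst],
--                 [*sub] if isinstance(sub, str) else sub,
--                 str(elem),
--                 _all=_all,
--             )
--         )
--
--     if not _all:
--         idx = lst.index(elem)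
--         return lst[:idx] + sub + lst[idx:]
--
--     split_lst = [
--         list(group if not k else []) for k, group in groupby(lst, lambda x: x == elem)
--     ]
--     return flatten(
--         [
--             sub + [elem] + sub_list if not sub_list else sub_list
--             for sub_list in split_lst
--         ]
--     )
-- ===== SOURCE B (Python) =====
-- def insert_before(lst, sub, elem, _all=False):
--     if isinstance(lst, str):
--         return "".join(
--             insert_before([*lst], [*sub] if isinstance(sub, str) else sub,
--                           str(elem), _all=_all)
--         )
--     out = []
--     if not _all:
--         # single forward scan: splice sub before the first occurrence
--         for i, x in enumerate(lst):
--             if x == elem: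
--                 out.extend(sub)
--                 out.extend(lst[i:])
--                 return out
--             out.append(x)
--         raise ValueError(f"{elem!r} is not in list")
--     # single forward scan with a run flag: collapse runs of elem,
--     # inserting sub before each run
--     prev_was_elem = False
--     for x in lst:
--         if x == elem:
--             if not prev_was_elem:
--                 out.extend(sub)
--                 out.append(elem)
--                 prev_was_elem = True
--         else:
--             out.append(x)
--             prev_was_elem = False
--     return out
-- ===== Notes on version B (the rewrite author's own statement) =====
-- stated objective: simpler
-- what changed: Replaced A's index+slice splice and its groupby/comprehension/flatten pipeline with single forward scans (one recursive first-match splice; one pass with a prev_was_elem flag that collapses runs of elem and inserts sub before each run).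
-- outside the precondition, e.g. on insert_before([1, 2], [9], 3, False): A raises ValueError, B raises ValueError
import Mathlib
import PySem

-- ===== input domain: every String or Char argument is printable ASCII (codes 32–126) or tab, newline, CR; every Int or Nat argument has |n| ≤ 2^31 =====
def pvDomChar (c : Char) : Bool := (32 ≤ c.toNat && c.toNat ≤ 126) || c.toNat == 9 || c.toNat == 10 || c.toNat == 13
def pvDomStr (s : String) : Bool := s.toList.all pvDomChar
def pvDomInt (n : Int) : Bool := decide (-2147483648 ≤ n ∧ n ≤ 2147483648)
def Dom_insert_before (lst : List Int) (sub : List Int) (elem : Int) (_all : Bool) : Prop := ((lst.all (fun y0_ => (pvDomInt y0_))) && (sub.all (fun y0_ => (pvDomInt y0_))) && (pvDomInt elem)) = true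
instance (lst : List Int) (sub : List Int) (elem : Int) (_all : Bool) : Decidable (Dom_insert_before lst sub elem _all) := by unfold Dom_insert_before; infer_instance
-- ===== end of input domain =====

-- B replaces A's groupby/comprehension/flatten pipeline (and index+slice path) with single forward scans; same return values, no speed claim.


-- ===== PORT A =====
-- itertools.groupby(lst, key) ported as consecutive grouping (built by recursion on the list)
def pyGroupby (key : Int → Bool) : List Int → List (Bool × List Int)
  | [] => []
  | x :: rest =>
    match pyGroupby key rest with
    | [] => [(key x, [x])]
    | (k, g) :: tl =>
      if key x = k then (k, x :: g) :: tl else (key x, [x]) :: (k, g) :: tl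

-- flatten(lst) with recurse=False on a list of int-lists = one-level flatten
def insert_before (lst : List Int) (sub : List Int) (elem : Int) (_all : Bool) : List Int :=
  if !_all then
    match PySem.List.index? lst elem with
    | some idx =>
        PySem.List.slice lst none (some (idx : Int)) ++ sub ++
          PySem.List.slice lst (some (idx : Int)) none
    | none => []   -- Python raises ValueError here; excluded by Pre_
  else
    let split_lst := (pyGroupby (fun x => x == elem) lst).map
      (fun kg => if !kg.1 then kg.2 else [])
    (split_lst.map (fun s => if s = [] then sub ++ [elem] ++ s else s)).flatten

-- ===== PORT B =====
-- B's first-occurrence scan: walk the list, splice sub at the first match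
def altFirst (sub : List Int) (elem : Int) : List Int → List Int
  | [] => []   -- Python raises ValueError here; excluded by Pre_
  | x :: rest => if x = elem then sub ++ x :: rest else x :: altFirst sub elem rest

-- B's _all scan: one pass with the prev_was_elem flag, collapsing runs of elem
def altAll (sub : List Int) (elem : Int) : List Int → Bool → List Int
  | [], _ => []
  | x :: rest, prev =>
    if x = elem then
      if prev then altAll sub elem rest true
      else sub ++ elem :: altAll sub elem rest true
    else x :: altAll sub elem rest false

def insert_before_alt (lst : List Int) (sub : List Int) (elem : Int) (_all : Bool) : List Int :=
  if !_all then altFirst sub elem lst else altAll sub elem lst false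

-- ===== PRECONDITION & SPEC =====
-- Pre_ excludes only the inputs where Python A raises ValueError: _all=False with elem absent from lst.
def Pre_insert_before (lst : List Int) (_sub : List Int) (elem : Int) (_all : Bool) : Prop :=
  _all = false → elem ∈ lst
instance (lst : List Int) (sub : List Int) (elem : Int) (_all : Bool) : Decidable (Pre_insert_before lst sub elem _all) := by unfold Pre_insert_before; infer_instance
def pvWitness_insert_before : List Int × List Int × Int × Bool := ([1, 2], [9], 1, false)

def Spec_insert_before (lst : List Int) (sub : List Int) (elem : Int) (_all : Bool) (out : List Int) : Prop := out = insert_before_alt lst sub elem _all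
instance (lst : List Int) (sub : List Int) (elem : Int) (_all : Bool) (out : List Int) : Decidable (Spec_insert_before lst sub elem _all out) := by unfold Spec_insert_before; infer_instance

-- ===== CLAIM (what is proved, stated in full; the proofs are below) =====
def Claim_equal_insert_before : Prop := ∀ (lst : List Int) (sub : List Int) (elem : Int) (_all : Bool), Dom_insert_before lst sub elem _all → Pre_insert_before lst sub elem _all → Spec_insert_before lst sub elem _all (insert_before lst sub elem _all)

-- ===== LEMMAS AND PROOFS =====

-- first-occurrence case: index+slice (A) equals the single scan (B) when elem is present
theorem noall_eq (lst sub : List Int) (elem : Int) (hmem : elem ∈ lst) :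
    (match PySem.List.index? lst elem with
     | some idx =>
         PySem.List.slice lst none (some (idx : Int)) ++ sub ++
           PySem.List.slice lst (some (idx : Int)) none
     | none => ([] : List Int)) = altFirst sub elem lst := by
  induction lst with
  | nil => cases hmem
  | cons x rest ih =>
    by_cases hx : x = elem
    · subst hx
      rw [PySem.List.index?_cons_self]
      show PySem.List.slice (x :: rest) none (some ((0 : Nat) : Int)) ++ _ ++
        PySem.List.slice (x :: rest) (some ((0 : Nat) : Int)) none = _
      rw [PySem.List.slice_to_natCast, PySem.List.slice_from_natCast]
      simp [altFirst]
    · have hmem' : elem ∈ rest := by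
        cases hmem with
        | head => exact absurd rfl hx
        | tail _ h => exact h
      rw [PySem.List.index?_cons_of_ne rest hx]
      obtain ⟨i, hi⟩ := Option.isSome_iff_exists.mp
        ((PySem.List.index?_isSome_iff rest elem).mpr hmem')
      have ih' := ih hmem'
      simp only [hi] at ih'
      simp only [hi, Option.map_some]
      rw [PySem.List.slice_to_natCast, PySem.List.slice_from_natCast] at ih' ⊢
      simp only [List.take_succ_cons, List.drop_succ_cons, altFirst, if_neg hx,
        List.cons_append]
      rw [ih']

-- well-formedness of groupby output: groups nonempty, homogeneous, alternating keys
def GOK (elem : Int) : List (Bool × List Int) → Prop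
  | [] => True
  | (k, g) :: tl =>
      g ≠ [] ∧ (∀ x ∈ g, (x = elem) ↔ k = true) ∧ GOK elem tl ∧
        (∀ k' g', tl.head? = some (k', g') → k' ≠ k)

theorem flatMap_pyGroupby (key : Int → Bool) (lst : List Int) :
    (pyGroupby key lst).flatMap (·.2) = lst := by
  induction lst with
  | nil => rfl
  | cons x rest ih =>
    simp only [pyGroupby]
    cases hg : pyGroupby key rest with
    | nil =>
      rw [hg] at ih
      simp at ih
      simp [← ih]
    | cons p tl =>
      obtain ⟨k, g⟩ := p
      rw [hg] at ih
      by_cases hk : key x = k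
      · simp only [if_pos hk, List.flatMap_cons] at ih ⊢
        simp [← ih]
      · simp only [if_neg hk, List.flatMap_cons] at ih ⊢
        simp [← ih]

theorem gok_pyGroupby (elem : Int) (lst : List Int) :
    GOK elem (pyGroupby (fun x => x == elem) lst) := by
  induction lst with
  | nil => trivial
  | cons x rest ih =>
    simp only [pyGroupby]
    cases hg : pyGroupby (fun x => x == elem) rest with
    | nil =>
      refine ⟨by simp, ?_, trivial, by simp⟩
      intro y hy
      simp only [List.mem_singleton] at hy
      subst hy
      simp
    | cons p tl =>
      obtain ⟨k, g⟩ := p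
      rw [hg] at ih
      obtain ⟨hne, hhom, htl, halt⟩ := ih
      by_cases hk : (x == elem) = k
      · simp only [if_pos hk]
        refine ⟨by simp, ?_, htl, halt⟩
        intro y hy
        cases hy with
        | head => rw [← hk]; simp
        | tail _ h => exact hhom y h
      · simp only [if_neg hk]
        refine ⟨by simp, ?_, ⟨hne, hhom, htl, halt⟩, ?_⟩
        · intro y hy
          simp only [List.mem_singleton] at hy
          subst hy
          simp
        · intro k' g' hhd
          simp only [List.head?_cons, Option.some.injEq, Prod.mk.injEq] at hhd
          rw [← hhd.1]
          exact fun h => hk h.symm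

theorem altAll_true_of_head (sub : List Int) (elem : Int) (l : List Int)
    (h : ∀ x, l.head? = some x → x ≠ elem) :
    altAll sub elem l true = altAll sub elem l false := by
  cases l with
  | nil => rfl
  | cons x rest =>
    have := h x rfl
    simp [altAll, this]

theorem altAll_elem_run_true (sub : List Int) (elem : Int) (g ys : List Int)
    (hall : ∀ x ∈ g, x = elem) :
    altAll sub elem (g ++ ys) true = altAll sub elem ys true := by
  induction g with
  | nil => rfl
  | cons x rest ih =>
    have hx := hall x (List.mem_cons_self ..)
    subst hx
    simpa [altAll] using ih (fun y hy => hall y (List.mem_cons_of_mem _ hy))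

theorem altAll_elem_run_false (sub : List Int) (elem : Int) (g ys : List Int)
    (hall : ∀ x ∈ g, x = elem) (hne : g ≠ []) :
    altAll sub elem (g ++ ys) false = sub ++ elem :: altAll sub elem ys true := by
  cases g with
  | nil => exact absurd rfl hne
  | cons x rest =>
    have hx := hall x (List.mem_cons_self ..)
    subst hx
    have hrest : ∀ y ∈ rest, y = x := fun y hy => hall y (List.mem_cons_of_mem _ hy)
    simp [altAll, altAll_elem_run_true sub x rest ys hrest]

theorem altAll_nonelem_run (sub : List Int) (elem : Int) (g ys : List Int)
    (hall : ∀ x ∈ g, x ≠ elem) :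
    altAll sub elem (g ++ ys) false = g ++ altAll sub elem ys false := by
  induction g with
  | nil => rfl
  | cons x rest ih =>
    have hx := hall x (List.mem_cons_self ..)
    simpa [altAll, hx] using ih (fun y hy => hall y (List.mem_cons_of_mem _ hy))

theorem groups_eq_altAll (sub : List Int) (elem : Int) (gs : List (Bool × List Int))
    (hok : GOK elem gs) :
    ((gs.map (fun kg => if !kg.1 then kg.2 else [])).map
        (fun s => if s = [] then sub ++ [elem] ++ s else s)).flatten
      = altAll sub elem (gs.flatMap (·.2)) false := by
  induction gs with
  | nil => rfl
  | cons p tl ih =>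
    obtain ⟨k, g⟩ := p
    obtain ⟨hne, hhom, htl, halt⟩ := hok
    have ihtl := ih htl
    simp only [List.map_cons, List.flatten_cons, List.flatMap_cons]
    cases k with
    | true =>
      have hall : ∀ x ∈ g, x = elem := fun x hx => (hhom x hx).mpr rfl
      rw [altAll_elem_run_false sub elem g _ hall hne]
      have hhd : ∀ x, (tl.flatMap (·.2)).head? = some x → x ≠ elem := by
        cases tl with
        | nil => intro x hx; simp at hx
        | cons q tl2 =>
          obtain ⟨k', g'⟩ := q
          have hk'f : k' = false := by
            have := halt k' g' rfl
            cases k' <;> simp_all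
          obtain ⟨hne', hhom', _, _⟩ := htl
          intro x hx
          cases g' with
          | nil => exact absurd rfl hne'
          | cons y g'' =>
            simp only [List.flatMap_cons, List.cons_append, List.head?_cons,
              Option.some.injEq] at hx
            intro hxe
            have hy : y = elem := hx.trans hxe
            have hcontra := (hhom' y (List.mem_cons_self ..)).mp hy
            rw [hk'f] at hcontra
            exact absurd hcontra (by simp)
      rw [altAll_true_of_head sub elem _ hhd, ← ihtl]
      simp
    | false =>
      have hall : ∀ x ∈ g, x ≠ elem := fun x hx h => by
        have := (hhom x hx).mp h
        simp at this
      rw [altAll_nonelem_run sub elem g _ hall, ← ihtl]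
      simp [hne]

theorem all_eq (lst sub : List Int) (elem : Int) :
    (((pyGroupby (fun x => x == elem) lst).map
        (fun kg => if !kg.1 then kg.2 else [])).map
      (fun s => if s = [] then sub ++ [elem] ++ s else s)).flatten
      = altAll sub elem lst false := by
  have h := groups_eq_altAll sub elem _ (gok_pyGroupby elem lst)
  rwa [flatMap_pyGroupby] at h


-- ===== VERDICT (by name: the statement is the Claim_ definition above) =====
theorem insert_before_spec : Claim_equal_insert_before := by
  intro lst sub elem al _ hpre
  unfold Spec_insert_before insert_before insert_before_alt
  cases al with
  | false => simp only [Bool.not_false]; exact noall_eq lst sub elem (hpre rfl)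
  | true => simp only [Bool.not_true]; exact all_eq lst sub elem
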